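-- pv_equiv track=rewrite | github.com/SalomePlatform/solverlab | solverlabGUI/solverlabpy/solverlabFilePatterns.py | filterColumsNamesForUranie
-- ===== SOURCE A (Python) =====
-- def filterColumsNamesForUranie(header):
--   """
--   assume inexisting header array with empty strings ''
--   lenght of #COLUMN_NAMES
--   fill incomplete array with ''
--   """
--   def get_headerArray(name):
--     try:
--       nb = len(header["COLUMN_NAMES"])
--     except:
--       nb = 0
--     res = ['' for i in range(nb)]
--     try:
--       ini = header[name]
--       for i in range(nb): res[i] = ini[i]
--       return res
--     except:
--       pass
--     return res
--
--   res = []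
--   #fmt = "%s{%i, '%s', '%s'}"
--   fmt = "#COLUMN: %s | %i | %s | %s"
--   try:
--     cn = header["COLUMN_NAMES"]
--     ct = get_headerArray("COLUMN_TITLES")
--     cu = get_headerArray("COLUMN_UNITS")
--     nb = len(cn)
--     tags = [isUranieColumn(i) for i in cn]
--     res = ['' for i in range(nb)]
--     res = [fmt % (cn[i], i, ct[i], cu[i]) for i in range(nb) if tags[i]]
--     res.extend([fmt % (cn[i], i, ct[i], cu[i]) for i in range(nb) if not tags[i]])
--   except:
--     pass
--   return res
--
-- def isUranieColumn(name):
--   uranieTags = 'n__iter__'.split() #may be some, later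
--   for tag in uranieTags:
--     if tag in name: return True
--   return False
-- ===== SOURCE B (Python) =====
-- def filterColumsNamesForUranie(header):
--   # Sort-then-map: stable-sort the column indices by the boolean key
--   # "not a Uranie column" (False sorts first), then format each line once.
--   if "COLUMN_NAMES" not in header:
--     return []
--   names = header["COLUMN_NAMES"]
--   nb = len(names)
--
--   def col(key):
--     vals = header.get(key, [])
--     return [vals[i] if i < len(vals) else '' for i in range(nb)]
--
--   titles = col("COLUMN_TITLES")
--   units = col("COLUMN_UNITS")
--   order = sorted(range(nb), key=lambda i: 'n__iter__' not in names[i])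
--   return ["#COLUMN: %s | %i | %s | %s" % (names[i], i, titles[i], units[i])
--           for i in order]
-- ===== Notes on version B (the rewrite author's own statement) =====
-- stated objective: alternative
-- what changed: B replaces A's tags list plus two filtered comprehensions with a sort-then-map: it stable-sorts the column indices by the boolean key 'not a Uranie column' (False first, which is exactly the stable partition) and formats each line once from the sorted order; title/unit padding is a direct bounds-checked comprehension instead of A's try/except copy loop.
import Mathlib
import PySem

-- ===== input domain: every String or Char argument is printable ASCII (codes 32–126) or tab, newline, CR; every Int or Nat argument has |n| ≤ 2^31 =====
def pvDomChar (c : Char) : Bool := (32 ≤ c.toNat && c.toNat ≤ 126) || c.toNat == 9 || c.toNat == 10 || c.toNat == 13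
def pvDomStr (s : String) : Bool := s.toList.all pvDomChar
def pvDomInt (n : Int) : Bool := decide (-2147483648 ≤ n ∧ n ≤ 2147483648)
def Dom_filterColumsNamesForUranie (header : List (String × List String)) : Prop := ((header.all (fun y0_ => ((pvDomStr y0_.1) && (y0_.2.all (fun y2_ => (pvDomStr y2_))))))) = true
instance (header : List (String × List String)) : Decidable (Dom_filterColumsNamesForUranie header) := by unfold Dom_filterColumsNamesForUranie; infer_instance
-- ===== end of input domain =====

-- B stable-sorts the column indices by a boolean "not Uranie" key and formats once
-- (sort-then-map) instead of A's tags list plus two filtered comprehensions; same cost.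


-- ===== PORT A =====
-- header[k] on the dict-as-association-list: first match (Python dicts have unique keys)
def pyLookupA (header : List (String × List String)) (k : String) : Option (List String) :=
  (header.find? (fun p => p.1 == k)).map Prod.snd

-- isUranieColumn: loop over uranieTags = ['n__iter__'], 'tag in name'
def isUranieColumn (name : String) : Bool :=
  (["n__iter__"]).any (fun tag => PySem.Str.isIn tag name)

-- the 'for i in range(nb): res[i] = ini[i]' loop; IndexError (ini[i]? = none) stops it,
-- the partially filled res is kept (A's 'except: pass; return res')
def copyLoopA (ini : List String) (res : List String) (i nb : Nat) : List String :=
  if _h : i < nb then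
    match ini[i]? with
    | some v => copyLoopA ini (res.set i v) (i + 1) nb
    | none => res
  else res
termination_by nb - i

def getHeaderArrayA (header : List (String × List String)) (name : String) : List String :=
  let nb := match pyLookupA header "COLUMN_NAMES" with | some l => l.length | none => 0
  let res := List.replicate nb ""
  match pyLookupA header name with
  | none => res
  | some ini => copyLoopA ini res 0 nb

-- fmt % (cn[i], i, ct[i], cu[i])
def fmtA (n : String) (i : Int) (t u : String) : String :=
  "#COLUMN: " ++ n ++ " | " ++ PySem.Int.toStr i ++ " | " ++ t ++ " | " ++ u

def filterColumsNamesForUranie (header : List (String × List String)) : List String :=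
  match pyLookupA header "COLUMN_NAMES" with
  | none => []  -- KeyError caught by the outer except; res stays []
  | some cn =>
    let ct := getHeaderArrayA header "COLUMN_TITLES"
    let cu := getHeaderArrayA header "COLUMN_UNITS"
    let nb := cn.length
    let tags := cn.map isUranieColumn
    let r := PySem.List.pyRange 0 (nb : Int) 1
    (r.filter (fun i => PySem.List.pyGetD tags i false)).map
        (fun i => fmtA (PySem.List.pyGetD cn i "") i (PySem.List.pyGetD ct i "") (PySem.List.pyGetD cu i ""))
      ++ (r.filter (fun i => !PySem.List.pyGetD tags i false)).map
        (fun i => fmtA (PySem.List.pyGetD cn i "") i (PySem.List.pyGetD ct i "") (PySem.List.pyGetD cu i ""))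

-- ===== PORT B =====
-- col(key): header.get(key, []) padded/truncated to nb with ''
def colB (header : List (String × List String)) (key : String) (nb : Nat) : List String :=
  let vals := ((header.find? (fun p => p.1 == key)).map Prod.snd).getD []
  (List.range nb).map (fun i => if i < vals.length then vals.getD i "" else "")

def fmtB (n : String) (i : Int) (t u : String) : String :=
  "#COLUMN: " ++ n ++ " | " ++ PySem.Int.toStr i ++ " | " ++ t ++ " | " ++ u

-- 'n__iter__' in names[i]  (the lambda's membership test)
def uranieAtB (names : List String) (i : Int) : Bool :=
  PySem.Str.isIn "n__iter__" (PySem.List.pyGetD names i "")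

-- the sort key: lambda i: 'n__iter__' not in names[i]  (bool = int 0/1, False first)
def keyB (names : List String) (i : Int) : Nat :=
  if uranieAtB names i then 0 else 1

def filterColumsNamesForUranie_alt (header : List (String × List String)) : List String :=
  match (header.find? (fun p => p.1 == "COLUMN_NAMES")).map Prod.snd with
  | none => []
  | some names =>
    let nb := names.length
    let titles := colB header "COLUMN_TITLES" nb
    let units := colB header "COLUMN_UNITS" nb
    let order := PySem.List.sorted (PySem.List.pyRange 0 (nb : Int) 1) (keyB names) false
    order.map (fun i => fmtB (PySem.List.pyGetD names i "") i
                  (PySem.List.pyGetD titles i "") (PySem.List.pyGetD units i ""))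

-- ===== PRECONDITION & SPEC =====
def Spec_filterColumsNamesForUranie (header : List (String × List String)) (out : List String) : Prop := out = filterColumsNamesForUranie_alt header
instance (header : List (String × List String)) (out : List String) : Decidable (Spec_filterColumsNamesForUranie header out) := by unfold Spec_filterColumsNamesForUranie; infer_instance

-- ===== CLAIM (what is proved, stated in full; the proofs are below) =====
def Claim_equal_filterColumsNamesForUranie : Prop := ∀ (header : List (String × List String)), Dom_filterColumsNamesForUranie header → Spec_filterColumsNamesForUranie header (filterColumsNamesForUranie header)

-- ===== LEMMAS AND PROOFS =====

-- A's copy loop starting from a ''-filled suffix produces the padded/truncated array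
theorem copyLoopA_spec (ini : List String) (nb : Nat) :
    ∀ (k i : Nat) (res : List String), nb - i = k → res.length = nb →
    res.drop i = List.replicate k "" →
    copyLoopA ini res i nb =
      res.take i ++ (List.range' i k).map
        (fun j => if j < ini.length then ini.getD j "" else "") := by
  intro k
  induction k with
  | zero =>
    intro i res hk hlen hdrop
    have hnb : ¬ i < nb := by omega
    have hle : res.length ≤ i := by omega
    unfold copyLoopA
    rw [dif_neg hnb]
    have h0 : List.range' i 0 = [] := rfl
    rw [h0, List.map_nil, List.append_nil, List.take_of_length_le hle]
  | succ k ih =>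
    intro i res hk hlen hdrop
    have hi : i < nb := by omega
    have hires : i < res.length := by omega
    unfold copyLoopA
    rw [dif_pos hi]
    cases hini : ini[i]? with
    | some v =>
      dsimp only
      have hilen : i < ini.length := by
        by_contra hc
        rw [List.getElem?_eq_none (by omega : ini.length ≤ i)] at hini
        simp at hini
      have hset : (res.set i v).drop (i + 1) = List.replicate k "" := by
        rw [List.drop_set, if_pos (by omega : i < i + 1)]
        have hdd : List.drop (i + 1) res = List.drop 1 (List.drop i res) := by
          rw [List.drop_drop]
        rw [hdd, hdrop]
        simp [List.replicate_succ]
      rw [ih (i + 1) (res.set i v) (by omega) (by simp [hlen]) hset]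
      have htake : (res.set i v).take (i + 1) = res.take i ++ [v] := by
        rw [List.take_add_one, List.take_set_of_le (Nat.le_refl i),
            List.getElem?_set_self hires]
        simp
      have hgv : (if i < ini.length then ini.getD i "" else "") = v := by
        rw [if_pos hilen, List.getD_eq_getElem?_getD, hini]
        rfl
      rw [htake, List.range'_succ, List.map_cons, hgv]
      simp
    | none =>
      dsimp only
      have hilen : ini.length ≤ i := by
        by_contra hc
        rw [List.getElem?_eq_getElem (by omega : i < ini.length)] at hini
        simp at hini
      have hmap : (List.range' i (k + 1)).map
          (fun j => if j < ini.length then ini.getD j "" else "")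
          = List.replicate (k + 1) "" := by
        rw [List.eq_replicate_iff]
        refine ⟨by simp, ?_⟩
        intro b hb
        rw [List.mem_map] at hb
        obtain ⟨j, hj, hbj⟩ := hb
        rw [List.mem_range'_1] at hj
        rw [← hbj, if_neg (by omega)]
      rw [hmap, ← hdrop, List.take_append_drop]

-- getHeaderArrayA equals B's colB when COLUMN_NAMES is present with length nb
theorem getHeaderArrayA_eq_colB (header : List (String × List String)) (name : String)
    (cn : List String) (h : pyLookupA header "COLUMN_NAMES" = some cn) :
    getHeaderArrayA header name = colB header name cn.length := by
  unfold getHeaderArrayA colB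
  rw [h]
  have hfind : (header.find? (fun p => p.1 == name)).map Prod.snd = pyLookupA header name := rfl
  rw [hfind]
  cases hl : pyLookupA header name with
  | none =>
    dsimp only
    symm
    rw [List.eq_replicate_iff]
    refine ⟨by simp, ?_⟩
    intro b hb
    rw [List.mem_map] at hb
    obtain ⟨j, hj, hbj⟩ := hb
    rw [← hbj]
    simp
  | some ini =>
    dsimp only
    rw [copyLoopA_spec ini cn.length cn.length 0 (List.replicate cn.length "")
      (by omega) (by simp) (by simp)]
    simp [List.range_eq_range']

-- inserting into u ++ o (u all key 0, o all key 1) with the stable rule lands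
-- x at the end of its bucket
theorem insertBy_two_valued {α : Type} (p : α → Bool) (x : α) :
    ∀ (u o : List α), (∀ y ∈ u, p y = true) → (∀ y ∈ o, p y = false) →
    PySem.List.insertBy
      (fun a b => decide ((if p a then (0:Nat) else 1) < (if p b then (0:Nat) else 1)))
      x (u ++ o) =
      if p x then u ++ x :: o else (u ++ o) ++ [x] := by
  intro u
  induction u with
  | nil =>
    intro o _ ho
    induction o with
    | nil => by_cases hx : p x = true <;> simp [PySem.List.insertBy, hx]
    | cons y ys iho =>
      have hy : p y = false := ho y (by simp)
      by_cases hx : p x = true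
      · simp [PySem.List.insertBy, hx, hy]
      · rw [Bool.not_eq_true] at hx
        have := iho (fun z hz => ho z (by simp [hz]))
        simp only [hx] at this ⊢
        simp only [List.nil_append] at this ⊢
        simp [PySem.List.insertBy, hx, hy, this]
  | cons a u' ih =>
    intro o hu ho
    have ha : p a = true := hu a (by simp)
    have hrec := ih o (fun z hz => hu z (by simp [hz])) ho
    by_cases hx : p x = true
    · simp only [hx, if_true] at hrec ⊢
      simp [PySem.List.insertBy, hx, ha, hrec]
    · rw [Bool.not_eq_true] at hx
      simp only [hx] at hrec ⊢
      simp [PySem.List.insertBy, hx, ha, hrec]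

-- the stable insertion-sort fold on a two-valued key is the stable partition
theorem foldl_insertBy_two_valued {α : Type} (p : α → Bool) :
    ∀ (l u o : List α), (∀ y ∈ u, p y = true) → (∀ y ∈ o, p y = false) →
    l.foldl (fun acc x => PySem.List.insertBy
        (fun a b => decide ((if p a then (0:Nat) else 1) < (if p b then (0:Nat) else 1)))
        x acc) (u ++ o)
      = (u ++ l.filter p) ++ (o ++ l.filter (fun x => !p x)) := by
  intro l
  induction l with
  | nil => intro u o _ _; simp
  | cons x xs ih =>
    intro u o hu ho
    rw [List.foldl_cons, insertBy_two_valued p x u o hu ho]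
    by_cases hx : p x = true
    · rw [if_pos hx]
      have hx' : (u ++ [x]) ++ o = u ++ x :: o := by simp
      rw [← hx', ih (u ++ [x]) o
        (fun z hz => by rcases List.mem_append.mp hz with h | h
                        · exact hu z h
                        · simp at h; rw [h]; exact hx) ho]
      simp [hx]
    · rw [Bool.not_eq_true] at hx
      rw [if_neg (by simp [hx]), List.append_assoc]
      rw [ih u (o ++ [x]) hu
        (fun z hz => by rcases List.mem_append.mp hz with h | h
                        · exact ho z h
                        · simp at h; rw [h]; exact hx)]
      simp [hx]

-- sorted with the 0/1 key IS the stable partition: p-elements first, each in order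
theorem sorted_two_valued {α : Type} (p : α → Bool) (l : List α) :
    PySem.List.sorted l (fun x => if p x then (0:Nat) else 1) false
      = l.filter p ++ l.filter (fun x => !p x) := by
  rw [PySem.List.sorted_eq_foldl_insertBy]
  have := foldl_insertBy_two_valued p l [] [] (by simp) (by simp)
  simpa using this

-- pointwise: A's tags-list lookup is B's direct substring test
theorem pyGetD_tags (cn : List String) (i : Int) (h0 : 0 ≤ i) (h : i < (cn.length : Int)) :
    PySem.List.pyGetD (cn.map isUranieColumn) i false
      = PySem.Str.isIn "n__iter__" (PySem.List.pyGetD cn i "") := by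
  rw [PySem.List.pyGetD_eq_getElem (cn.map isUranieColumn) false h0 (by simpa using h),
      PySem.List.pyGetD_eq_getElem cn "" h0 h]
  have hn : i.toNat < cn.length := by omega
  simp [isUranieColumn]

-- ===== VERDICT (by name: the statement is the Claim_ definition above) =====
theorem filterColumsNamesForUranie_spec : Claim_equal_filterColumsNamesForUranie := by
  intro header _
  unfold Spec_filterColumsNamesForUranie
  unfold filterColumsNamesForUranie filterColumsNamesForUranie_alt
  have hsc : (header.find? (fun p => p.1 == "COLUMN_NAMES")).map Prod.snd
      = pyLookupA header "COLUMN_NAMES" := rfl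
  rw [hsc]
  cases h : pyLookupA header "COLUMN_NAMES" with
  | none => rfl
  | some cn =>
    dsimp only
    rw [getHeaderArrayA_eq_colB header "COLUMN_TITLES" cn h,
        getHeaderArrayA_eq_colB header "COLUMN_UNITS" cn h]
    have hkey : keyB cn = fun i => if uranieAtB cn i then (0:Nat) else 1 := rfl
    rw [hkey, sorted_two_valued (uranieAtB cn) (PySem.List.pyRange 0 (cn.length : Int) 1),
        List.map_append]
    have hP : ∀ i ∈ PySem.List.pyRange 0 (cn.length : Int) 1,
        PySem.List.pyGetD (cn.map isUranieColumn) i false = uranieAtB cn i := by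
      intro i hi
      rw [PySem.List.mem_pyRange_one] at hi
      exact pyGetD_tags cn i hi.1 hi.2
    have hfmt : fmtA = fmtB := rfl
    congr 1
    · rw [List.filter_congr hP, hfmt]
    · rw [List.filter_congr (fun i hi => by rw [hP i hi]), hfmt]
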